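-- pv_equiv track=rewrite | github.com/Harshit2756/DSA | A2Z_striver/1 Basics/1.5 Hashing/sum_hghest_lowest_frq/sum_hghest_lowest_frq.py | sumHighestAndLowestManual
-- ===== SOURCE A (Python) =====
-- from collections import Counter
--
-- def sumHighestAndLowestManual(nums):
--     if not nums: return 0
--
--     # - Step 1: Count Frequencies
--     # Time: O(N)
--     counts = Counter(nums)
--
--     # - Step 2: Initialize Extremes
--     # We start min with infinity so the first number we see is smaller.
--     # We start max with -1 (or -inf) so the first number is larger.
--     min_freq = float('inf')
--     max_freq = float('-inf')
--
--     # - Step 3: Single Pass Loop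
--     # Time: O(U) where U is unique elements
--     for freq in counts.values():
--
--         # Update Max
--         if freq > max_freq:
--             max_freq = freq
--
--         # Update Min
--         if freq < min_freq:
--             min_freq = freq
--
--     # - Step 4: Return Sum
--     return max_freq + min_freq
-- ===== SOURCE B (Python) =====
-- from collections import Counter
--
-- def sumHighestAndLowestManual(nums):
--     if not nums:
--         return 0
--     freqs = sorted(Counter(nums).values())
--     return freqs[0] + freqs[-1]
-- ===== Notes on version B (the rewrite author's own statement) =====
-- stated objective: simpler
-- what changed: Replaces the manual running min/max scan over the frequency values with a single sort of the frequency multiset, reading the extremes off its two endpoints (freqs[0] + freqs[-1]).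
import Mathlib
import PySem

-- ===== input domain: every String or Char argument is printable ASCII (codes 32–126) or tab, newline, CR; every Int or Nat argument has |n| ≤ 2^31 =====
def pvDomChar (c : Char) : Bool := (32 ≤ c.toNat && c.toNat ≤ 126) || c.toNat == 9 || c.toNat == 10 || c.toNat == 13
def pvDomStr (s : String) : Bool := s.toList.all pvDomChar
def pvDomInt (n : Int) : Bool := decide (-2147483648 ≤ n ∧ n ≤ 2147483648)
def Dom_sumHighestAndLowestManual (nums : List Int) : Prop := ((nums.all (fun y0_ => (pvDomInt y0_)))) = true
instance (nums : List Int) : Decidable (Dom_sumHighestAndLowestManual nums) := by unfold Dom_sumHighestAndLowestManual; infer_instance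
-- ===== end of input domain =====

-- B replaces A's manual running-min/max scan over the frequency values with one sort
-- of the frequency multiset, reading the extremes off its endpoints (objective: simpler).


-- ===== PORT A =====
-- min_freq = float('inf') / max_freq = float('-inf') are modelled as `none` (the first
-- frequency always replaces them; the values list is nonempty after the guard, so the
-- final match's fallback 0 is unreachable).
def sumHighestAndLowestManual (nums : List Int) : Int :=
  if nums = [] then 0
  else
    let counts := PySem.Dict.counter nums
    let r := counts.values.foldl
      (fun (s : Option Int × Option Int) freq =>
        let mx := if (match s.2 with | none => true | some m => decide (m < freq)) then some freq else s.2
        let mn := if (match s.1 with | none => true | some m => decide (freq < m)) then some freq else s.1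
        (mn, mx))
      (none, none)
    match r with
    | (some mn, some mx) => mx + mn
    | _ => 0

-- ===== PORT B =====
-- freqs[0] and freqs[-1] via pyGet?; the list is nonempty after the guard, so .getD 0
-- never supplies its default.
def sumHighestAndLowestManual_alt (nums : List Int) : Int :=
  if nums = [] then 0
  else
    let freqs := PySem.List.sorted (PySem.Dict.counter nums).values (fun x => x) false
    (PySem.List.pyGet? freqs 0).getD 0 + (PySem.List.pyGet? freqs (-1)).getD 0

-- ===== PRECONDITION & SPEC =====
def Spec_sumHighestAndLowestManual (nums : List Int) (out : Int) : Prop := out = sumHighestAndLowestManual_alt nums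
instance (nums : List Int) (out : Int) : Decidable (Spec_sumHighestAndLowestManual nums out) := by unfold Spec_sumHighestAndLowestManual; infer_instance

-- ===== CLAIM (what is proved, stated in full; the proofs are below) =====
def Claim_equal_sumHighestAndLowestManual : Prop := ∀ (nums : List Int), Dom_sumHighestAndLowestManual nums → Spec_sumHighestAndLowestManual nums (sumHighestAndLowestManual nums)

-- ===== LEMMAS AND PROOFS =====

-- A's loop over the remaining values, once both accumulators hold a value, is the
-- running min / running max fold.
theorem pvFoldA (t : List Int) (a b : Int) :
    t.foldl
      (fun (s : Option Int × Option Int) freq =>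
        let mx := if (match s.2 with | none => true | some m => decide (m < freq)) then some freq else s.2
        let mn := if (match s.1 with | none => true | some m => decide (freq < m)) then some freq else s.1
        (mn, mx))
      (some a, some b)
    = (some (t.foldl min a), some (t.foldl max b)) := by
  induction t generalizing a b with
  | nil => rfl
  | cons x t ih =>
    simp only [List.foldl_cons]
    have h1 : (if x < a then some x else some a) = some (min a x) := by
      rw [min_def]; split_ifs with p q <;> simp_all <;> omega
    have h2 : (if b < x then some x else some b) = some (max b x) := by
      rw [max_def]; split_ifs with p q <;> simp_all <;> omega
    simp only [decide_eq_true_eq]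
    simp only [h1, h2]
    exact ih (min a x) (max b x)

-- in a ≤-sorted nonempty list every member is ≤ the last element
theorem pvLeGetLast (l : List Int) (hp : l.Pairwise (· ≤ ·)) (hne : l ≠ []) :
    ∀ y ∈ l, y ≤ l.getLast hne := by
  induction l with
  | nil => simp at hne
  | cons a u ih =>
    rcases List.pairwise_cons.mp hp with ⟨ha, hu⟩
    intro y hy
    cases u with
    | nil => simp at hy; simp [hy, List.getLast]
    | cons c w =>
      have hlast : (a :: c :: w).getLast hne = (c :: w).getLast (by simp) := by
        simp [List.getLast]
      rw [hlast]
      rcases List.mem_cons.mp hy with rfl | hy'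
      · exact le_trans (ha c List.mem_cons_self) (ih hu (by simp) c List.mem_cons_self)
      · exact ih hu (by simp) _ hy'

theorem sumHighestAndLowestManual_eq (nums : List Int) :
    sumHighestAndLowestManual nums = sumHighestAndLowestManual_alt nums := by
  by_cases hnil : nums = []
  · simp [sumHighestAndLowestManual, sumHighestAndLowestManual_alt, hnil]
  · unfold sumHighestAndLowestManual sumHighestAndLowestManual_alt
    simp only [if_neg hnil]
    set vs := (PySem.Dict.counter nums).values with hvs
    have hvne : vs ≠ [] := by
      rcases List.exists_mem_of_ne_nil nums hnil with ⟨n0, hn0⟩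
      intro h
      have hi : (PySem.Dict.counter nums).items = [] := List.map_eq_nil_iff.mp h
      rw [PySem.Dict.items_counter] at hi
      have hnil2 : PySem.Set.ofList nums = [] := List.map_eq_nil_iff.mp hi
      have : n0 ∈ PySem.Set.ofList nums := (PySem.Set.mem_ofList nums n0).mpr hn0
      rw [hnil2] at this; simp at this
    rcases List.exists_cons_of_ne_nil hvne with ⟨v, t, hcons⟩
    set s := PySem.List.sorted vs (fun x => x) false with hs
    have hsne : s ≠ [] := fun h => hvne ((PySem.List.sorted_eq_nil_iff vs (fun x => x) false).mp h)
    rcases List.exists_cons_of_ne_nil hsne with ⟨h0, u, hscons⟩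
    have hperm : s.Perm vs := PySem.List.sorted_perm ..
    -- A's value
    rw [hcons]
    simp only [List.foldl_cons, if_true]
    have hfold : t.foldl
        (fun (s : Option Int × Option Int) freq =>
          let mx := if (match s.2 with | none => true | some m => decide (m < freq)) then some freq else s.2
          let mn := if (match s.1 with | none => true | some m => decide (freq < m)) then some freq else s.1
          (mn, mx))
        (some v, some v) = (some (t.foldl min v), some (t.foldl max v)) := pvFoldA t v v
    -- B's value
    have hget0 : PySem.List.pyGet? s 0 = some h0 := by
      rw [hscons]; exact PySem.List.pyGet?_zero_cons ..
    have hgetm1 : PySem.List.pyGet? s (-1) = some (s.getLast hsne) := by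
      rw [PySem.List.pyGet?_neg_one, List.getLast?_eq_some_getLast]
    -- h0 is the minimum
    have hminmem : t.foldl min v ∈ vs := by
      rw [hcons]; rcases PySem.List.foldl_min_mem t v with h | h
      · rw [h]; exact List.mem_cons_self
      · exact List.mem_cons_of_mem _ h
    have hminle : ∀ y ∈ vs, t.foldl min v ≤ y := by
      intro y hy; rw [hcons] at hy
      rcases List.mem_cons.mp hy with rfl | hy'
      · exact (PySem.List.foldl_min_le t y).1
      · exact (PySem.List.foldl_min_le t v).2 y hy'
    have hh0le : ∀ y ∈ vs, h0 ≤ y := by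
      have := PySem.List.key_head_sorted_le (key := fun x => x) (xs := vs) hscons
      simpa using this
    have hh0mem : h0 ∈ vs := hperm.mem_iff.mp (by rw [hscons]; exact List.mem_cons_self)
    have hmin : h0 = t.foldl min v :=
      le_antisymm (hh0le _ hminmem) (hminle _ hh0mem)
    -- getLast is the maximum
    have hmaxmem : t.foldl max v ∈ vs := by
      rw [hcons]; rcases PySem.List.foldl_max_mem t v with h | h
      · rw [h]; exact List.mem_cons_self
      · exact List.mem_cons_of_mem _ h
    have hmaxge : ∀ y ∈ vs, y ≤ t.foldl max v := by
      intro y hy; rw [hcons] at hy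
      rcases List.mem_cons.mp hy with rfl | hy'
      · exact (PySem.List.le_foldl_max t y).1
      · exact (PySem.List.le_foldl_max t v).2 y hy'
    have hpair : s.Pairwise (· ≤ ·) := by
      have := PySem.List.sorted_pairwise (xs := vs) (key := fun x => x)
      simpa using this
    have hlastmem : s.getLast hsne ∈ vs := hperm.mem_iff.mp (List.getLast_mem hsne)
    have hlastge : ∀ y ∈ vs, y ≤ s.getLast hsne := by
      intro y hy
      exact pvLeGetLast s hpair hsne y (hperm.mem_iff.mpr hy)
    have hmax : s.getLast hsne = t.foldl max v :=
      le_antisymm (hmaxge _ hlastmem) (hlastge _ hmaxmem)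
    rw [hfold, hget0, hgetm1]
    simp [hmin, hmax]
    omega

-- ===== VERDICT (by name: the statement is the Claim_ definition above) =====
theorem sumHighestAndLowestManual_spec : Claim_equal_sumHighestAndLowestManual := by
  intro nums _
  unfold Spec_sumHighestAndLowestManual
  exact sumHighestAndLowestManual_eq nums
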